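-- pv_equiv track=rewrite | github.com/sofi444/CLE-graph-dependency-parser | src/tmp_feat_vectors.py | get_fv_one_arc
-- ===== SOURCE A (Python) =====
-- def get_fv_one_arc(feat_map, features_one_arc):
--
--     fv = [0 for i in range(len(feat_map))]
--     fv_dense = []
--
--     for feature in features_one_arc:
--         feat_idx = feat_map[feature]
--
--         fv_dense.append(feat_idx)
--         fv[feat_idx] = 1
--
--     assert len(fv) == len(feat_map)
--
--     return fv, fv_dense
-- ===== SOURCE B (Python) =====
-- def get_fv_one_arc(feat_map, features_one_arc):
--
--     fv_dense = [feat_map[feature] for feature in features_one_arc]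
--
--     active = set(fv_dense)
--     fv = [1 if i in active else 0 for i in range(len(feat_map))]
--
--     assert len(fv) == len(feat_map)
--
--     return fv, fv_dense
-- ===== Notes on version B (the rewrite author's own statement) =====
-- stated objective: idiomatic
-- what changed: B first maps all features to their indices in one comprehension (same first-missing-key KeyError), then builds fv by a GATHER pass over range(len(feat_map)) testing membership in set(fv_dense), instead of A's interleaved loop that scatters 1s into a pre-zeroed mutable list per occurrence; there is no preallocated vector and no in-place writes.
-- intended difference: On inputs where some feature maps to a negative in-range index v whose wrapped position v+len(feat_map) is not also some feature's index, A silently marks position v+len via Python's negative-index wraparound while B marks only the nonnegative index positions themselves (fv_dense is identical); B's reading is the intended one since a feature map assigns positions 0..len-1 and the wraparound mark is an accident of list assignment. — e.g. on get_fv_one_arc([("a", -1)], ["a"]): A returns ([1], [-1]), B returns ([0], [-1])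
import Mathlib
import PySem

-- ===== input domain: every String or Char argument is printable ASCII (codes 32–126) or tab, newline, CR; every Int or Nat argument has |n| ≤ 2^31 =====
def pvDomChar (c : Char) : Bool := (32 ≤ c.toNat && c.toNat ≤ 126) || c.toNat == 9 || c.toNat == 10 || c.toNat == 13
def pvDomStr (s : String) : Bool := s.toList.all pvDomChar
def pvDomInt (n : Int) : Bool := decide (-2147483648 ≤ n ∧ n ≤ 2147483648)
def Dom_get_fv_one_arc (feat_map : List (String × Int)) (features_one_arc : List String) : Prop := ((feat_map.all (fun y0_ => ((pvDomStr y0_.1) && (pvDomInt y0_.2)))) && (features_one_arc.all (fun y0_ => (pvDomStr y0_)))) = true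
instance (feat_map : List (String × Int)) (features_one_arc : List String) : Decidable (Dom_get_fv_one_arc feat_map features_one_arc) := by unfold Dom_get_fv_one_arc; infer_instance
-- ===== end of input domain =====

-- B builds fv_dense in one comprehension, then constructs fv by a GATHER pass over range(len(feat_map))
-- testing set membership, instead of A's interleaved per-occurrence scatter into a pre-zeroed list;
-- on a negative in-range index A wraps around (fv[v]=1 marks position n+v) while B marks only the
-- nonnegative index positions themselves — stated as the intended difference D_ below.


-- ===== PORT A =====
-- zero vector, then one interleaved loop: for each feature, look up its index, append it to the
-- dense list and set fv[idx] = 1 (Python list assignment, from-the-end for negative indices).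
-- Option threads the KeyError (missing key) / IndexError (index out of range) cases; Pre_ excludes them.
def get_fv_one_arc (feat_map : List (String × Int)) (features_one_arc : List String) : List Int × List Int :=
  let fv0 : List Int := (PySem.List.pyRange 0 (feat_map.length : Int) 1).map (fun _ => 0)
  let res : Option (List Int × List Int) := features_one_arc.foldl
    (fun st feature => st.bind (fun p =>
      ((PySem.Dict.mk feat_map).get? feature).bind (fun feat_idx =>
        (PySem.List.pySet? p.1 feat_idx 1).map (fun fv' => (fv', p.2 ++ [feat_idx])))))
    (some (fv0, []))
  res.getD ([], [])

-- ===== PORT B =====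
-- one comprehension for the whole dense list (KeyError threaded by Option), then active = set(fv_dense)
-- and a gather pass: fv = [1 if i in active else 0 for i in range(len(feat_map))]. No preallocated
-- vector and no writes — each position is computed by a membership test.
def get_fv_one_arc_alt (feat_map : List (String × Int)) (features_one_arc : List String) : List Int × List Int :=
  match features_one_arc.mapM (fun feature => (PySem.Dict.mk feat_map).get? feature) with
  | none => ([], [])
  | some fv_dense =>
    let active : PySem.Set Int := PySem.Set.ofList fv_dense
    let fv : List Int := (PySem.List.pyRange 0 (feat_map.length : Int) 1).map
      (fun i => if PySem.Set.contains active i then 1 else 0)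
    (fv, fv_dense)

-- ===== PRECONDITION & SPEC =====
-- Pre_ excludes exactly the inputs where A raises: a feature missing from feat_map (KeyError)
-- or a looked-up index outside the valid Python index range [-len(feat_map), len(feat_map)) (IndexError).
def Pre_get_fv_one_arc (feat_map : List (String × Int)) (features_one_arc : List String) : Prop :=
  ∀ f ∈ features_one_arc,
    (((PySem.Dict.mk feat_map).get? f).any
      (fun v => decide (-(feat_map.length : Int) ≤ v ∧ v < (feat_map.length : Int)))) = true
instance (feat_map : List (String × Int)) (features_one_arc : List String) : Decidable (Pre_get_fv_one_arc feat_map features_one_arc) := by unfold Pre_get_fv_one_arc; infer_instance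

def pvWitness_get_fv_one_arc : (List (String × Int)) × List String := ([("a", 0), ("b", 1)], ["b", "a", "b"])

-- On inputs where some feature maps to a negative in-range index v whose wrapped position
-- v + len(feat_map) is not also some feature's index, A marks position v + len(feat_map) with 1 via
-- Python's negative-index wraparound, while B leaves it 0 and marks only nonnegative index positions
-- (fv_dense is identical); B's reading is the intended one, since a feature map assigns positions
-- 0..len-1 and the wraparound mark is an accident of Python list assignment.
-- the looked-up index of each feature (missing features read as 0; under Pre_ every lookup succeeds)
def pvIdxs (feat_map : List (String × Int)) (features_one_arc : List String) : List Int :=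
  features_one_arc.map (fun f => (feat_map.lookup f).getD 0)

def D_get_fv_one_arc (feat_map : List (String × Int)) (features_one_arc : List String) : Prop :=
  ∃ v ∈ pvIdxs feat_map features_one_arc,
    v < 0 ∧ v + (feat_map.length : Int) ∉ pvIdxs feat_map features_one_arc
instance (feat_map : List (String × Int)) (features_one_arc : List String) : Decidable (D_get_fv_one_arc feat_map features_one_arc) := by unfold D_get_fv_one_arc; infer_instance

def Spec_get_fv_one_arc (feat_map : List (String × Int)) (features_one_arc : List String) (out : List Int × List Int) : Prop := ¬ D_get_fv_one_arc feat_map features_one_arc → out = get_fv_one_arc_alt feat_map features_one_arc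
instance (feat_map : List (String × Int)) (features_one_arc : List String) (out : List Int × List Int) : Decidable (Spec_get_fv_one_arc feat_map features_one_arc out) := by unfold Spec_get_fv_one_arc; infer_instance

def pvDiffWitness_get_fv_one_arc : (List (String × Int)) × List String := ([("a", -1)], ["a"])
def pvDiffWitnessOut_get_fv_one_arc : (List Int × List Int) × (List Int × List Int) :=
  (([1], [-1]), ([0], [-1]))

-- ===== CLAIM (what is proved, stated in full; the proofs are below) =====
def Claim_unchanged_get_fv_one_arc : Prop := ∀ (feat_map : List (String × Int)) (features_one_arc : List String), Dom_get_fv_one_arc feat_map features_one_arc → Pre_get_fv_one_arc feat_map features_one_arc → Spec_get_fv_one_arc feat_map features_one_arc (get_fv_one_arc feat_map features_one_arc)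
def Claim_changed_get_fv_one_arc : Prop := Dom_get_fv_one_arc (pvDiffWitness_get_fv_one_arc.1) (pvDiffWitness_get_fv_one_arc.2) ∧ Pre_get_fv_one_arc (pvDiffWitness_get_fv_one_arc.1) (pvDiffWitness_get_fv_one_arc.2) ∧ D_get_fv_one_arc (pvDiffWitness_get_fv_one_arc.1) (pvDiffWitness_get_fv_one_arc.2) ∧ get_fv_one_arc (pvDiffWitness_get_fv_one_arc.1) (pvDiffWitness_get_fv_one_arc.2) = pvDiffWitnessOut_get_fv_one_arc.1 ∧ get_fv_one_arc_alt (pvDiffWitness_get_fv_one_arc.1) (pvDiffWitness_get_fv_one_arc.2) = pvDiffWitnessOut_get_fv_one_arc.2 ∧ pvDiffWitnessOut_get_fv_one_arc.1 ≠ pvDiffWitnessOut_get_fv_one_arc.2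
def Claim_exact_get_fv_one_arc : Prop := ∀ (feat_map : List (String × Int)) (features_one_arc : List String), Dom_get_fv_one_arc feat_map features_one_arc → Pre_get_fv_one_arc feat_map features_one_arc → D_get_fv_one_arc feat_map features_one_arc → get_fv_one_arc feat_map features_one_arc ≠ get_fv_one_arc_alt feat_map features_one_arc

-- ===== LEMMAS AND PROOFS =====

-- the looked-up index of a feature (used only by the proofs to describe both programs' results)
def pvGetv (feat_map : List (String × Int)) (f : String) : Int :=
  (((PySem.Dict.mk feat_map).get? f)).getD 0

-- the position Python's list assignment writes for an in-range (possibly negative) index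
def pvPos (n : Nat) (v : Int) : Nat := if 0 ≤ v then v.toNat else n - (-v).toNat

lemma pv_pySet?_some (fv : List Int) (v : Int) (h : PySem.Raise.InRange fv.length v) :
    PySem.List.pySet? fv v 1 = some (fv.set (pvPos fv.length v) 1) := by
  obtain ⟨h1, h2⟩ := h
  simp only [PySem.List.pySet?, PySem.List.pyIdx?, pvPos]
  split_ifs with hv
  · rfl
  · rfl

lemma pv_pySetD_eq_set (fv : List Int) (v : Int) (h : PySem.Raise.InRange fv.length v) :
    PySem.List.pySetD fv v 1 = fv.set (pvPos fv.length v) 1 := by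
  simp [PySem.List.pySetD, pv_pySet?_some fv v h]

lemma pv_pos_lt (n : Nat) (v : Int) (h : PySem.Raise.InRange n v) : pvPos n v < n := by
  obtain ⟨h1, h2⟩ := h
  simp only [pvPos]
  split_ifs with hv <;> omega

lemma pv_scatter_length (vs : List Int) : ∀ (fv : List Int),
    (vs.foldl (fun a v => PySem.List.pySetD a v 1) fv).length = fv.length := by
  induction vs with
  | nil => intro fv; rfl
  | cons v vs ih => intro fv; simp [List.foldl_cons, ih, PySem.List.length_pySetD]

lemma pv_scatter_getD (vs : List Int) : ∀ (fv : List Int) (j : Nat),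
    (∀ v ∈ vs, PySem.Raise.InRange fv.length v) → j < fv.length →
    (vs.foldl (fun a v => PySem.List.pySetD a v 1) fv).getD j 0
      = if ∃ v ∈ vs, pvPos fv.length v = j then 1 else fv.getD j 0 := by
  induction vs with
  | nil => intro fv j _ _; simp
  | cons v vs ih =>
    intro fv j hvs hj
    have hv : PySem.Raise.InRange fv.length v := hvs v (List.mem_cons_self ..)
    have hset : (PySem.List.pySetD fv v 1).getD j 0
        = if pvPos fv.length v = j then 1 else fv.getD j 0 := by
      rw [pv_pySetD_eq_set fv v hv]
      by_cases hjv : pvPos fv.length v = j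
      · subst hjv
        rw [if_pos rfl, List.getD_eq_getElem?_getD,
            List.getElem?_set_self (pv_pos_lt _ _ hv)]
        rfl
      · rw [if_neg hjv, List.getD_eq_getElem?_getD, List.getD_eq_getElem?_getD,
            List.getElem?_set_ne hjv]
    have hlen : (PySem.List.pySetD fv v 1).length = fv.length := PySem.List.length_pySetD ..
    rw [List.foldl_cons,
        ih (PySem.List.pySetD fv v 1) j
          (fun w hw => by rw [hlen]; exact hvs w (List.mem_cons_of_mem _ hw))
          (by rwa [hlen]),
        hlen, hset]
    by_cases h1 : ∃ w ∈ vs, pvPos fv.length w = j <;> by_cases h2 : pvPos fv.length v = j <;>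
      simp [h1, h2]

-- A's loop, when every lookup succeeds with an in-range index, never hits the Option failure and
-- produces the scatter of the looked-up indices (in occurrence order, duplicates included).
lemma pv_foldA (feat_map : List (String × Int)) (fs : List String) :
  ∀ (fv ds : List Int),
    (∀ f ∈ fs, ∃ v, (PySem.Dict.mk feat_map).get? f = some v ∧ PySem.Raise.InRange fv.length v) →
    fs.foldl
      (fun st feature => st.bind (fun p =>
        ((PySem.Dict.mk feat_map).get? feature).bind (fun feat_idx =>
          (PySem.List.pySet? p.1 feat_idx 1).map (fun fv' => (fv', p.2 ++ [feat_idx])))))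
      (some (fv, ds))
      = some ((fs.map (pvGetv feat_map)).foldl (fun a v => PySem.List.pySetD a v 1) fv,
              ds ++ fs.map (pvGetv feat_map)) := by
  induction fs with
  | nil => intro fv ds _; simp
  | cons f fs ih =>
    intro fv ds h
    obtain ⟨v, hv, hrange⟩ := h f (List.mem_cons_self ..)
    have hset : PySem.List.pySet? fv v 1 = some (PySem.List.pySetD fv v 1) := by
      rw [pv_pySet?_some fv v hrange, pv_pySetD_eq_set fv v hrange]
    have hg : pvGetv feat_map f = v := by simp [pvGetv, hv]
    rw [List.foldl_cons]
    simp only [Option.bind_some, hv, Option.bind_some, hset, Option.map_some]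
    rw [ih (PySem.List.pySetD fv v 1) (ds ++ [v])
      (by
        intro g hgm
        obtain ⟨w, hw, hwr⟩ := h g (List.mem_cons_of_mem _ hgm)
        exact ⟨w, hw, by rwa [PySem.List.length_pySetD]⟩)]
    simp [hg, List.append_assoc]

-- B's comprehension: when every lookup succeeds it is the list of looked-up indices.
lemma pv_mapM (feat_map : List (String × Int)) (fs : List String)
    (h : ∀ f ∈ fs, ∃ v, (PySem.Dict.mk feat_map).get? f = some v) :
    fs.mapM (fun feature => (PySem.Dict.mk feat_map).get? feature)
      = some (fs.map (pvGetv feat_map)) := by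
  induction fs with
  | nil => rfl
  | cons f fs ih =>
    obtain ⟨v, hv⟩ := h f (List.mem_cons_self ..)
    rw [List.mapM_cons, hv, ih (fun g hg => h g (List.mem_cons_of_mem _ hg))]
    simp [pvGetv, hv]

-- A's zero vector is replicate
lemma pv_fv0_eq_replicate (n : Nat) :
    ((PySem.List.pyRange 0 (n : Int) 1).map (fun _ => (0 : Int))) = List.replicate n 0 := by
  rw [PySem.List.pyRange_one, List.map_map]
  simp only [Function.comp_def]
  simp [List.map_const']

-- Dict lookup on an association list is List.lookup (both: first match)
lemma pv_get?_eq_lookup (l : List (String × Int)) (x : String) :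
    (PySem.Dict.mk l).get? x = l.lookup x := by
  induction l with
  | nil => rfl
  | cons p rest ih =>
    obtain ⟨k, v⟩ := p
    rw [PySem.Dict.get?_mk_cons]
    by_cases h : k = x
    · subst h
      simp [List.lookup]
    · have h' : (x == k) = false := by
        simp only [beq_eq_false_iff_ne, ne_eq]
        exact fun e => h e.symm
      simp [List.lookup, h, h', ih]

lemma pv_idxs_eq (fm : List (String × Int)) (fs : List String) :
    pvIdxs fm fs = fs.map (pvGetv fm) := by
  simp [pvIdxs, pvGetv, pv_get?_eq_lookup]

-- from Pre_: every lookup succeeds with an in-range index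
lemma pv_hOK (fm : List (String × Int)) (fs : List String)
    (hPre : Pre_get_fv_one_arc fm fs) :
    ∀ f ∈ fs, ∃ v, (PySem.Dict.mk fm).get? f = some v ∧
      PySem.Raise.InRange fm.length v := by
  intro f hf
  have h1 := hPre f hf
  cases hv : (PySem.Dict.mk fm).get? f with
  | none => rw [hv] at h1; simp [Option.any] at h1
  | some v =>
    rw [hv] at h1
    simp [Option.any] at h1
    exact ⟨v, rfl, h1.1, h1.2⟩

-- A's port, under Pre_, in closed form: scatter of the looked-up indices into the zero vector
lemma pv_A_eq (fm : List (String × Int)) (fs : List String)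
    (hOK : ∀ f ∈ fs, ∃ v, (PySem.Dict.mk fm).get? f = some v ∧
      PySem.Raise.InRange fm.length v) :
    get_fv_one_arc fm fs =
      ((fs.map (pvGetv fm)).foldl (fun a v => PySem.List.pySetD a v 1)
         (List.replicate fm.length 0),
       fs.map (pvGetv fm)) := by
  unfold get_fv_one_arc
  simp only [pv_fv0_eq_replicate]
  simp only [pv_foldA fm fs (List.replicate fm.length 0) []
    (by rw [List.length_replicate]; exact hOK)]
  simp

-- B's port, under Pre_, in closed form: the gather over range(len(feat_map))
lemma pv_B_eq (fm : List (String × Int)) (fs : List String)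
    (hOK : ∀ f ∈ fs, ∃ v, (PySem.Dict.mk fm).get? f = some v ∧
      PySem.Raise.InRange fm.length v) :
    get_fv_one_arc_alt fm fs =
      ((PySem.List.pyRange 0 (fm.length : Int) 1).map
         (fun i => if PySem.Set.contains (PySem.Set.ofList (fs.map (pvGetv fm))) i
                   then 1 else 0),
       fs.map (pvGetv fm)) := by
  unfold get_fv_one_arc_alt
  rw [pv_mapM fm fs (fun f hf => (hOK f hf).imp (fun v hv => hv.1))]

-- the gather vector element j is the membership bit of j
lemma pv_gather_getElem (n : Nat) (vs : List Int) (j : Nat)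
    (hj : j < ((PySem.List.pyRange 0 (n : Int) 1).map
      (fun i => if PySem.Set.contains (PySem.Set.ofList vs) i then (1 : Int) else 0)).length) :
    ((PySem.List.pyRange 0 (n : Int) 1).map
      (fun i => if PySem.Set.contains (PySem.Set.ofList vs) i then (1 : Int) else 0))[j]
      = if (j : Int) ∈ vs then 1 else 0 := by
  rw [List.getElem_map, PySem.List.getElem_pyRange_one]
  by_cases hm : (j : Int) ∈ vs
  · rw [if_pos (by rwa [zero_add, PySem.Set.contains_iff, PySem.Set.mem_ofList]), if_pos hm]
  · rw [if_neg (by rw [zero_add, PySem.Set.contains_iff, PySem.Set.mem_ofList]; exact hm),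
        if_neg hm]

-- the scatter vector element j is 1 iff some index writes position j
lemma pv_scatter_spec (n : Nat) (vs : List Int) (j : Nat)
    (hvs : ∀ v ∈ vs, PySem.Raise.InRange n v) (hj : j < n) :
    (vs.foldl (fun a v => PySem.List.pySetD a v 1) (List.replicate n (0 : Int))).getD j 0
      = if ∃ v ∈ vs, pvPos n v = j then 1 else 0 := by
  rw [pv_scatter_getD vs (List.replicate n 0) j
      (by rw [List.length_replicate]; exact hvs) (by rwa [List.length_replicate]),
      List.length_replicate]
  by_cases hm : ∃ v ∈ vs, pvPos n v = j
  · simp [hm]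
  · simp [hm, List.getD_eq_getElem?_getD, hj]

-- ===== VERDICT (by name: the statement is the Claim_ definition above) =====
theorem get_fv_one_arc_spec : Claim_unchanged_get_fv_one_arc := by
  intro fm fs _ hPre
  unfold Spec_get_fv_one_arc
  intro hD
  have hOK := pv_hOK fm fs hPre
  have hvs0 : ∀ v ∈ fs.map (pvGetv fm), PySem.Raise.InRange fm.length v := by
    intro v hv
    obtain ⟨f, hf, hfv⟩ := List.mem_map.mp hv
    obtain ⟨w, hw, hwr⟩ := hOK f hf
    have : pvGetv fm f = w := by simp [pvGetv, hw]
    rw [← hfv, this]; exact hwr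
  -- ¬ D_: every negative looked-up index has its wrapped position among the looked-up indices
  have hclose : ∀ v ∈ fs.map (pvGetv fm), v < 0 → (v + (fm.length : Int)) ∈ fs.map (pvGetv fm) := by
    intro v hv hvneg
    by_contra hout
    exact hD ⟨v, by rwa [pv_idxs_eq], hvneg, by rwa [pv_idxs_eq]⟩
  rw [pv_A_eq fm fs hOK, pv_B_eq fm fs hOK]
  refine Prod.ext ?_ rfl
  apply List.ext_getElem
  · rw [pv_scatter_length, List.length_replicate, List.length_map,
        PySem.List.length_pyRange_one]
    omega
  · intro j hj1 hj2
    have hjn : j < fm.length := by rwa [pv_scatter_length, List.length_replicate] at hj1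
    rw [pv_gather_getElem fm.length (fs.map (pvGetv fm)) j hj2,
        ← List.getD_eq_getElem _ 0 hj1,
        pv_scatter_spec fm.length (fs.map (pvGetv fm)) j hvs0 hjn]
    by_cases hm : (j : Int) ∈ fs.map (pvGetv fm)
    · rw [if_pos hm, if_pos ?_]
      exact ⟨(j : Int), hm, by simp [pvPos]⟩
    · rw [if_neg hm, if_neg ?_]
      rintro ⟨v, hv, hp⟩
      by_cases h0 : 0 ≤ v
      · apply hm
        have : v = (j : Int) := by
          simp only [pvPos, if_pos h0] at hp
          omega
        rwa [← this]
      · rw [not_le] at h0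
        have hw := hclose v hv h0
        apply hm
        obtain ⟨hlo, _⟩ := hvs0 v hv
        have : v + (fm.length : Int) = (j : Int) := by
          simp only [pvPos, if_neg (by omega : ¬ (0 : Int) ≤ v)] at hp
          omega
        rwa [← this]

theorem get_fv_one_arc_changed : Claim_changed_get_fv_one_arc := by
  unfold Claim_changed_get_fv_one_arc; decide

theorem get_fv_one_arc_tight : Claim_exact_get_fv_one_arc := by
  intro fm fs _ hPre hD heq
  have hOK := pv_hOK fm fs hPre
  -- extract the witness of D_: a negative index v whose wrapped position no feature hits
  unfold D_get_fv_one_arc at hD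
  rw [pv_idxs_eq] at hD
  obtain ⟨v, hmemv, hvneg, hno⟩ := hD
  obtain ⟨f, hf, hfv⟩ := List.mem_map.mp hmemv
  obtain ⟨v', hv', hrange⟩ := hOK f hf
  have hveq : v' = v := by rw [← hfv]; simp [pvGetv, hv']
  rw [hveq] at hrange
  obtain ⟨hlo, hhi⟩ := hrange
  have hvs0 : ∀ w ∈ fs.map (pvGetv fm), PySem.Raise.InRange fm.length w := by
    intro w hw
    obtain ⟨g, hg, hgw⟩ := List.mem_map.mp hw
    obtain ⟨u, hu, hur⟩ := hOK g hg
    have : pvGetv fm g = u := by simp [pvGetv, hu]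
    rw [← hgw, this]; exact hur
  -- the wrapped position
  set j : Nat := ((fm.length : Int) + v).toNat with hjdef
  have hj0 : (0 : Int) ≤ (fm.length : Int) + v := by omega
  have hjint : (j : Int) = (fm.length : Int) + v := Int.toNat_of_nonneg hj0
  have hjn : j < fm.length := by omega
  -- the wrapped position is not a looked-up index
  have hnotmem : (j : Int) ∉ fs.map (pvGetv fm) := by
    intro hm
    apply hno
    have hvj : v + (fm.length : Int) = (j : Int) := by omega
    rwa [hvj]
  rw [pv_A_eq fm fs hOK, pv_B_eq fm fs hOK] at heq
  have hfst := congrArg Prod.fst heq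
  simp only at hfst
  have hj2 : j < ((PySem.List.pyRange 0 (fm.length : Int) 1).map
      (fun i => if PySem.Set.contains (PySem.Set.ofList (fs.map (pvGetv fm))) i
                then (1 : Int) else 0)).length := by
    rw [List.length_map, PySem.List.length_pyRange_one]; omega
  have hj1 : j < ((fs.map (pvGetv fm)).foldl (fun a w => PySem.List.pySetD a w 1)
      (List.replicate fm.length (0 : Int))).length := by
    rw [pv_scatter_length, List.length_replicate]; exact hjn
  have hA1 : ((fs.map (pvGetv fm)).foldl (fun a w => PySem.List.pySetD a w 1)
      (List.replicate fm.length (0 : Int))).getD j 0 = 1 := by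
    rw [pv_scatter_spec fm.length (fs.map (pvGetv fm)) j hvs0 hjn, if_pos]
    refine ⟨v, hmemv, ?_⟩
    simp only [pvPos, if_neg (by omega : ¬ (0 : Int) ≤ v)]
    omega
  have hB0 : ((PySem.List.pyRange 0 (fm.length : Int) 1).map
      (fun i => if PySem.Set.contains (PySem.Set.ofList (fs.map (pvGetv fm))) i
                then (1 : Int) else 0))[j] = 0 := by
    rw [pv_gather_getElem fm.length (fs.map (pvGetv fm)) j hj2, if_neg hnotmem]
  have : (1 : Int) = 0 := by
    rw [← hA1, List.getD_eq_getElem _ 0 hj1, List.getElem_of_eq hfst hj1, hB0]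
  exact absurd this (by norm_num)
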